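-- pv_equiv track=rewrite | github.com/AlessandroStaffolani/prorl-orchestrator | prorl/common/plots.py | filter_multi_run_code
-- ===== SOURCE A (Python) =====
-- def filter_multi_run_code(multi_run_code: str) -> str:
--     parts = multi_run_code.split('-')
--     stop_index = 0
--     for i, part in enumerate(parts):
--         if 'scheduled_at=' in part:
--             stop_index = i
--             break
--     code = '-'.join(parts[0: stop_index])
--     return code.replace('v2-', '')
-- ===== SOURCE B (Python) =====
-- def filter_multi_run_code(multi_run_code: str) -> str:
--     # Peel off one dash-separated part at a time with partition, collecting the
--     # parts seen before the one containing the marker; no full split/index scan.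
--     code_parts = None
--     collected = []
--     s = multi_run_code
--     while True:
--         head, sep, tail = s.partition('-')
--         if 'scheduled_at=' in head:
--             code_parts = collected
--             break
--         if not sep:
--             break
--         collected.append(head)
--         s = tail
--     code = '' if code_parts is None else '-'.join(code_parts)
--     return code.replace('v2-', '')
-- ===== Notes on version B (the rewrite author's own statement) =====
-- stated objective: alternative
-- what changed: Instead of splitting the whole string, scanning the parts list for the marker's index, slicing and re-joining, B peels off one dash-separated part at a time with str.partition and collects the prefix parts until it meets the marker (or the end), stopping early.
import Mathlib
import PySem

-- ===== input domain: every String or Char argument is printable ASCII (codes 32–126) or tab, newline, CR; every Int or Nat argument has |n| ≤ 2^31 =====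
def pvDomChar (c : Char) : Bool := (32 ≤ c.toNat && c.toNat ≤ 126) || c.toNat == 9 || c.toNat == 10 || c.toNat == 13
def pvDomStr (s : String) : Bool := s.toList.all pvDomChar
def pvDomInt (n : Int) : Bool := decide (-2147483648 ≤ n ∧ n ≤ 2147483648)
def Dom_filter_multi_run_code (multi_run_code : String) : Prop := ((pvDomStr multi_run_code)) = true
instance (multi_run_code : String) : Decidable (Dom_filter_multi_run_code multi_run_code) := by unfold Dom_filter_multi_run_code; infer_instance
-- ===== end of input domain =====

-- B replaces A's full-split + index-scan + slice + join with a loop that peels one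
-- dash-separated part at a time via partition, collecting prefix parts until the marker.


-- ===== PORT A =====
-- the for-loop with break: first index whose part contains the marker, else 0
def aStop (parts : List String) (i : Nat) : Nat :=
  match parts with
  | [] => 0
  | p :: rest => if PySem.Str.isIn "scheduled_at=" p then i else aStop rest (i + 1)

def filter_multi_run_code (multi_run_code : String) : String :=
  -- split('-') with a non-empty literal separator never raises: split? is `some`
  let parts := (PySem.Str.split? multi_run_code "-").getD []
  let stop_index := aStop parts 0
  let code := PySem.Str.join "-" (PySem.List.slice parts (some 0) (some (stop_index : Int)))
  PySem.Str.replace code "v2-" ""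

-- ===== PORT B =====
-- the marker 'scheduled_at=' as a named constant (a stable normal form for the proofs)
def markerC : List Char := "scheduled_at=".toList

-- the while-loop: s.partition('-') gives head = takeWhile (≠ '-'); the separator was
-- found iff head is shorter than s; ported step for step at the List Char level
def bLoop (s : List Char) (collected : List (List Char)) : Option (List (List Char)) :=
  let head := s.takeWhile (fun c => c ≠ '-')
  if PySem.Chars.isIn markerC head then some collected
  else if _h : s.length ≤ head.length then none
  else bLoop (s.drop (head.length + 1)) (collected ++ [head])
termination_by s.length
decreasing_by simp only [List.length_drop]; omega

def filter_multi_run_code_alt (multi_run_code : String) : String :=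
  let code : List Char :=
    match bLoop multi_run_code.toList [] with
    | none => []
    | some ps => PySem.Chars.join ['-'] ps
  String.ofList (PySem.Chars.replace code ("v2-".toList) [])

-- ===== PRECONDITION & SPEC =====
def Spec_filter_multi_run_code (multi_run_code : String) (out : String) : Prop := out = filter_multi_run_code_alt multi_run_code
instance (multi_run_code : String) (out : String) : Decidable (Spec_filter_multi_run_code multi_run_code out) := by unfold Spec_filter_multi_run_code; infer_instance

-- ===== CLAIM (what is proved, stated in full; the proofs are below) =====
def Claim_equal_filter_multi_run_code : Prop := ∀ (multi_run_code : String), Dom_filter_multi_run_code multi_run_code → Spec_filter_multi_run_code multi_run_code (filter_multi_run_code multi_run_code)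

-- ===== LEMMAS AND PROOFS =====

theorem markerC_eq : "scheduled_at=".toList = markerC := rfl

-- simple structural recursion equal to Chars.splitOn · ['-']
def sOn : List Char → List (List Char)
  | [] => [[]]
  | c :: cs => if c = '-' then [] :: sOn cs else (sOn cs).modifyHead (c :: ·)

theorem sOn_ne_nil (cs : List Char) : sOn cs ≠ [] := by
  induction cs with
  | nil => simp [sOn]
  | cons c cs ih =>
    simp only [sOn]
    split_ifs
    · simp
    · cases h : sOn cs with
      | nil => exact absurd h ih
      | cons a l => simp

theorem go_spec (fuel : Nat) (l cur : List Char) (acc : List (List Char))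
    (h : l.length ≤ fuel) :
    PySem.Chars.splitOn.go ['-'] fuel l cur acc
      = acc.reverse ++ (sOn l).modifyHead (cur.reverse ++ ·) := by
  induction fuel generalizing l cur acc with
  | zero =>
    have : l = [] := List.length_eq_zero_iff.mp (Nat.le_zero.mp h)
    subst this
    simp [PySem.Chars.splitOn.go, sOn]
  | succ fuel ih =>
    cases l with
    | nil => simp [PySem.Chars.splitOn.go, sOn]
    | cons c rest =>
      by_cases hc : c = '-'
      · subst hc
        have hpre : List.isPrefixOf ['-'] ('-' :: rest) = true := by
          simp [List.isPrefixOf]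
        rw [show PySem.Chars.splitOn.go ['-'] (fuel + 1) ('-' :: rest) cur acc
              = PySem.Chars.splitOn.go ['-'] fuel (List.drop (List.length ['-']) ('-' :: rest)) [] (cur.reverse :: acc) by
            simp [PySem.Chars.splitOn.go, hpre]]
        rw [ih _ _ _ (by simpa using Nat.le_of_succ_le_succ (by simpa using h))]
        cases hs : sOn rest with
        | nil => exact absurd hs (sOn_ne_nil rest)
        | cons a t => simp [sOn, hs]
      · have hpre : List.isPrefixOf ['-'] (c :: rest) = false := by
          simp [List.isPrefixOf, hc]
          intro h'; exact absurd h'.symm hc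
        rw [show PySem.Chars.splitOn.go ['-'] (fuel + 1) (c :: rest) cur acc
              = PySem.Chars.splitOn.go ['-'] fuel rest (c :: cur) acc by
            simp [PySem.Chars.splitOn.go, hpre]]
        rw [ih _ _ _ (by simpa using Nat.le_of_succ_le_succ (by simpa using h))]
        cases hs : sOn rest with
        | nil => exact absurd hs (sOn_ne_nil rest)
        | cons a t => simp [sOn, hs, hc]

theorem splitOn_eq_sOn (cs : List Char) : PySem.Chars.splitOn cs ['-'] = sOn cs := by
  unfold PySem.Chars.splitOn
  rw [go_spec _ _ _ _ (by omega)]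
  cases hs : sOn cs with
  | nil => exact absurd hs (sOn_ne_nil cs)
  | cons a t => simp

-- partition-style characterization of sOn
theorem sOn_eq (cs : List Char) :
    sOn cs = cs.takeWhile (fun c => c ≠ '-') ::
      (if (cs.takeWhile (fun c => c ≠ '-')).length = cs.length then []
       else sOn (cs.drop ((cs.takeWhile (fun c => c ≠ '-')).length + 1))) := by
  induction cs with
  | nil => simp [sOn]
  | cons c cs ih =>
    by_cases hc : c = '-'
    · subst hc
      simp only [sOn, if_pos rfl]
      have h1 : ('-' :: cs).takeWhile (fun c => c ≠ '-') = [] := by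
        simp [List.takeWhile]
      rw [h1]
      simp
    · have htw : (c :: cs).takeWhile (fun c => c ≠ '-')
          = c :: cs.takeWhile (fun c => c ≠ '-') := by
        simp [List.takeWhile, hc]
      rw [sOn, if_neg hc, ih, htw]
      by_cases hlen : (cs.takeWhile (fun c => c ≠ '-')).length = cs.length
      · rw [if_pos hlen, if_pos (by simpa using hlen)]
        simp [List.modifyHead]
      · rw [if_neg hlen, if_neg (by simpa using hlen)]
        simp [List.modifyHead]

-- Chars-level copy of the A-side loop
def aStopC (parts : List (List Char)) (i : Nat) : Nat :=
  match parts with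
  | [] => 0
  | p :: rest => if PySem.Chars.isIn markerC p then i else aStopC rest (i + 1)

theorem aStop_eq_aStopC (ps : List String) (i : Nat) :
    aStop ps i = aStopC (ps.map String.toList) i := by
  induction ps generalizing i with
  | nil => rfl
  | cons p rest ih => simp [aStop, aStopC, PySem.Str.isIn_eq, markerC_eq, ih]

theorem aStopC_zero_of_not_found (l : List (List Char))
    (h : ∀ p ∈ l, PySem.Chars.isIn markerC p = false) (i : Nat) :
    aStopC l i = 0 := by
  induction l generalizing i with
  | nil => rfl
  | cons p rest ih =>
    have hp := h p (by simp)
    rw [aStopC, if_neg (by simp [hp])]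
    exact ih (fun q hq => h q (by simp [hq])) _

theorem aStopC_add_of_found (l : List (List Char))
    (h : ∃ p ∈ l, PySem.Chars.isIn markerC p = true) (i : Nat) :
    aStopC l i = aStopC l 0 + i := by
  induction l generalizing i with
  | nil => simp at h
  | cons p rest ih =>
    by_cases hp : PySem.Chars.isIn markerC p = true
    · simp [aStopC, hp]
    · have hr : ∃ q ∈ rest, PySem.Chars.isIn markerC q = true := by
        rcases h with ⟨q, hq, hq2⟩
        rcases List.mem_cons.mp hq with rfl | hq
        · exact absurd hq2 hp
        · exact ⟨q, hq, hq2⟩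
      simp only [aStopC, if_neg hp]
      rw [ih hr, ih hr 1]
      omega

-- the heart of the file: bLoop computes exactly A's `parts[0:stop_index]`, prefixed by acc
theorem bLoop_spec (cs : List Char) (acc : List (List Char)) :
    (bLoop cs acc = none ∧
        ∀ p ∈ sOn cs, PySem.Chars.isIn markerC p = false) ∨
    (∃ ps, bLoop cs acc = some ps ∧
        ps = acc ++ (sOn cs).take (aStopC (sOn cs) 0) ∧
        ∃ p ∈ sOn cs, PySem.Chars.isIn markerC p = true) := by
  induction hn : cs.length using Nat.strong_induction_on generalizing cs acc with
  | _ n ih =>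
  subst hn
  rw [bLoop]
  set head := cs.takeWhile (fun c => c ≠ '-') with hhead
  have hle : head.length ≤ cs.length := (List.takeWhile_prefix _).length_le
  by_cases hin : PySem.Chars.isIn markerC head = true
  · right
    refine ⟨acc, by simp [hin], ?_, ?_⟩
    · rw [sOn_eq cs, ← hhead]
      simp [aStopC, hin]
    · exact ⟨head, by rw [sOn_eq cs, ← hhead]; simp, hin⟩
  · by_cases hfull : cs.length ≤ head.length
    · left
      refine ⟨by simp [hin, hfull], ?_⟩
      rw [sOn_eq cs, ← hhead]
      have : head.length = cs.length := Nat.le_antisymm hle hfull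
      simp [this, hin]
    · have hlt : head.length < cs.length := Nat.lt_of_not_le hfull
      have hdrop : (cs.drop (head.length + 1)).length < cs.length := by
        simp [List.length_drop]; omega
      have := ih _ hdrop (cs.drop (head.length + 1)) (acc ++ [head]) rfl
      rcases this with ⟨hnone, hall⟩ | ⟨ps, hsome, hps, hfound⟩
      · left
        refine ⟨by simp [hin, hfull, hnone], ?_⟩
        rw [sOn_eq cs, ← hhead]
        have hne : ¬ head.length = cs.length := by omega
        intro p hp
        rcases List.mem_cons.mp (by simpa [hne] using hp) with rfl | hp
        · simpa using hin
        · exact hall p hp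
      · right
        refine ⟨ps, by simp [hin, hfull, hsome], ?_, ?_⟩
        · rw [sOn_eq cs, ← hhead]
          have hne : ¬ head.length = cs.length := by omega
          simp only [if_neg hne]
          rw [hps]
          have hst : aStopC (head :: sOn (cs.drop (head.length + 1))) 0
              = aStopC (sOn (cs.drop (head.length + 1))) 0 + 1 := by
            simp only [aStopC, if_neg hin]
            exact aStopC_add_of_found _ hfound 1
          rw [hst]
          simp
        · rw [sOn_eq cs, ← hhead]
          have hne : ¬ head.length = cs.length := by omega
          rcases hfound with ⟨p, hp, hp2⟩
          exact ⟨p, by simp [hne, hp], hp2⟩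

theorem take_slice {α : Type} (xs : List α) (n : Nat) :
    PySem.List.slice xs (some 0) (some (n : Int)) = xs.take n := by
  have h0 : PySem.List.slice xs (some 0) (some (n : Int))
      = PySem.List.slice xs none (some (n : Int)) := by
    simp [PySem.List.slice]
  rw [h0, PySem.List.slice_to xs (by positivity)]
  simp

-- ===== VERDICT (by name: the statement is the Claim_ definition above) =====
theorem filter_multi_run_code_spec : Claim_equal_filter_multi_run_code := by
  intro s _
  unfold Spec_filter_multi_run_code filter_multi_run_code filter_multi_run_code_alt
  obtain ⟨partsS, hpartsS⟩ : ∃ ps, PySem.Str.split? s "-" = some ps := by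
    have h := PySem.Str.split?_map s "-"
    cases hs : PySem.Str.split? s "-" with
    | none => rw [hs] at h; simp [PySem.Chars.split?] at h
    | some ps => exact ⟨ps, rfl⟩
  have hmap : partsS.map String.toList = sOn s.toList := by
    have h := PySem.Str.split?_map s "-"
    rw [hpartsS] at h
    simp only [Option.map_some] at h
    rw [show "-".toList = ['-'] from rfl] at h
    simp [PySem.Chars.split?, splitOn_eq_sOn] at h
    exact h
  rw [hpartsS]
  simp only [Option.getD_some]
  unfold PySem.Str.replace
  apply congrArg String.ofList
  have hjoin : (PySem.Str.join "-"
      (PySem.List.slice partsS (some 0) (some ((aStop partsS 0 : Nat) : Int)))).toList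
      = PySem.Chars.join ['-'] ((sOn s.toList).take (aStopC (sOn s.toList) 0)) := by
    unfold PySem.Str.join
    rw [String.toList_ofList, take_slice, aStop_eq_aStopC, List.map_take, hmap]
    rfl
  rcases bLoop_spec s.toList [] with ⟨hnone, hall⟩ | ⟨ps, hsome, hps, hfound⟩
  · rw [hjoin, aStopC_zero_of_not_found _ hall]
    simp [hnone, PySem.Chars.join, List.intercalate]
  · rw [hjoin]
    simp only [hsome]
    rw [hps]
    simp
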